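-- pv_equiv track=rewrite | github.com/atvKail/solve | USE/ПолноценноеРешениеВариантов/ВариантЕГЭФокфорд/12.py | simulate_editor
-- ===== SOURCE A (Python) =====
-- def simulate_editor(n):
--     s = ">" + "0" * 15 + "1" * n + "2" * 21
--
--     while ">1" in s or ">2" in s or ">0" in s:
--         if ">1" in s:
--             s = s.replace(">1", "23>", 1)
--         if ">2" in s:
--             s = s.replace(">2", "2>", 1)
--         if ">0" in s:
--             s = s.replace(">0", "3>", 1)
--
--     result_string = s.replace(">", "")
--
--     digit_sum = sum(int(digit) for digit in result_string)
--
--     return digit_sum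
-- ===== SOURCE B (Python) =====
-- def simulate_editor(n):
--     # Closed form: the cursor sweeps right once, rewriting 0->"3" (+3 each of 15),
--     # 1->"23" (+4 each of n), 2->"2" (unchanged, 21 of them).
--     # Initial digit sum 15*0 + n*1 + 21*2 = n + 42, so total = 42 + n + 45 + 4*n = 87 + 5*n.
--     return 87 + 5 * max(n, 0)
-- ===== Notes on version B (the rewrite author's own statement) =====
-- stated objective: faster
-- what changed: Replaced the quadratic string-rewriting simulation (repeated substring search and replace) by the closed form 87 + 5*max(n, 0), derived from the effect of one cursor sweep.
import Mathlib
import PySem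

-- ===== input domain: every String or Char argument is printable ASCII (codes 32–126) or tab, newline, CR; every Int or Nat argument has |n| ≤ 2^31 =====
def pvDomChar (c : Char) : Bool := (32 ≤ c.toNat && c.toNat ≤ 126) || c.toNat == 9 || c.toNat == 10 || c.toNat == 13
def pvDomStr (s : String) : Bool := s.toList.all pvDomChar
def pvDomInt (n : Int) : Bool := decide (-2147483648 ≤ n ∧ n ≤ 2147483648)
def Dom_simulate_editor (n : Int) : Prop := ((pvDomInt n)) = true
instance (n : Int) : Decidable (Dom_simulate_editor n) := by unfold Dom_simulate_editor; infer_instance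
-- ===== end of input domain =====

-- B replaces A's quadratic repeated search-and-replace simulation by the closed form 87 + 5*max(n,0) (objective: faster).

-- ===== PORT A =====
-- s.replace(old, new, 1) — replace the FIRST occurrence only; exact for nonempty old (A only uses 2-char patterns)
def replaceOnce (s old new : List Char) : List Char :=
  let i := PySem.Chars.find s old
  if i = -1 then s else s.take i.toNat ++ new ++ s.drop (i.toNat + old.length)

-- int(digit) for one character; exact whenever the character is a digit (all characters of A's result string are)
def pyDigitVal (c : Char) : Int := (PySem.Int.ofStr? (String.ofList [c])).getD 0

-- the body of A's while loop (three sequential conditional replacements on s)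
def editorBody (s : List Char) : List Char :=
  let s1 := if PySem.Chars.isIn ['>', '1'] s then replaceOnce s ['>', '1'] ['2', '3', '>'] else s
  let s2 := if PySem.Chars.isIn ['>', '2'] s1 then replaceOnce s1 ['>', '2'] ['2', '>'] else s1
  if PySem.Chars.isIn ['>', '0'] s2 then replaceOnce s2 ['>', '0'] ['3', '>'] else s2

-- A's while loop; fuel is a totality guard only and is never exhausted
-- (each iteration shortens the suffix after '>', see editorLoop_cursor below)
def editorLoop : Nat → List Char → List Char
  | 0, s => s
  | fuel + 1, s =>
    if PySem.Chars.isIn ['>', '1'] s || PySem.Chars.isIn ['>', '2'] s || PySem.Chars.isIn ['>', '0'] s then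
      editorLoop fuel (editorBody s)
    else s

def simulate_editor (n : Int) : Int :=
  let s0 := ['>'] ++ List.replicate 15 '0' ++ List.replicate n.toNat '1' ++ List.replicate 21 '2'
  let sF := editorLoop s0.length s0
  let result := PySem.Chars.replace sF ['>'] []
  result.foldl (fun acc c => acc + pyDigitVal c) 0

-- ===== PORT B =====
def simulate_editor_alt (n : Int) : Int := 87 + 5 * max n 0

-- ===== PRECONDITION & SPEC =====
def Spec_simulate_editor (n : Int) (out : Int) : Prop := out = simulate_editor_alt n
instance (n : Int) (out : Int) : Decidable (Spec_simulate_editor n out) := by unfold Spec_simulate_editor; infer_instance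

-- ===== CLAIM (what is proved, stated in full; the proofs are below) =====
def Claim_equal_simulate_editor : Prop := ∀ (n : Int), Dom_simulate_editor n → Spec_simulate_editor n (simulate_editor n)

-- ===== LEMMAS AND PROOFS =====

-- what the cursor sweep rewrites each digit to
def trChar (c : Char) : List Char := if c = '0' then ['3'] else if c = '1' then ['2', '3'] else ['2']
def trAll (R : List Char) : List Char := R.flatMap trChar

lemma prefix_two_iff (a b : Char) (l : List Char) :
    [a, b] <+: l ↔ l[0]? = some a ∧ l[1]? = some b := by
  match l with
  | [] => simp
  | [x] => simp [List.cons_prefix_cons, eq_comm]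
  | x :: y :: t => simp [List.cons_prefix_cons, eq_comm]

lemma getElem?_gt (L R : List Char) (hL : '>' ∉ L) (hR : '>' ∉ R) (j : Nat) :
    ((L ++ '>' :: R)[j]? = some '>') ↔ j = L.length := by
  constructor
  · intro h
    rcases lt_trichotomy j L.length with hj | hj | hj
    · rw [List.getElem?_append_left hj] at h
      exact absurd (List.mem_of_getElem? h) hL
    · exact hj
    · rw [List.getElem?_append_right (le_of_lt hj)] at h
      rcases Nat.exists_eq_add_of_lt hj with ⟨k, hk⟩
      have : j - L.length = k + 1 := by omega
      rw [this] at h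
      simp only [List.getElem?_cons_succ] at h
      exact absurd (List.mem_of_getElem? h) hR
  · rintro rfl
    rw [List.getElem?_append_right (le_refl _)]
    simp

lemma find_cursor (L R : List Char) (c : Char) (hL : '>' ∉ L) (hR : '>' ∉ R) :
    PySem.Chars.find (L ++ '>' :: R) ['>', c] = if R.head? = some c then (L.length : Int) else -1 := by
  split
  · rename_i hhead
    have hinf : ['>', c] <+: (L ++ '>' :: R).drop L.length := by
      rw [List.drop_left, prefix_two_iff]
      cases R with
      | nil => simp at hhead
      | cons r t => simp at hhead; simp [hhead]
    have hin : PySem.Chars.isIn ['>', c] (L ++ '>' :: R) = true :=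
      (PySem.Chars.exists_prefix_drop_iff_isIn _ _).mp ⟨_, hinf⟩
    have hnn : 0 ≤ PySem.Chars.find (L ++ '>' :: R) ['>', c] := by
      rw [PySem.Chars.find_nonneg_iff]
      exact (PySem.Chars.isIn_iff_infix _ _).mp hin
    obtain ⟨hpre, _⟩ := PySem.Chars.find_spec hnn
    rw [prefix_two_iff] at hpre
    have h0 : (L ++ '>' :: R)[(PySem.Chars.find (L ++ '>' :: R) ['>', c]).toNat]? = some '>' := by
      have := hpre.1
      rwa [List.getElem?_drop, Nat.add_zero] at this
    have hj := (getElem?_gt L R hL hR _).mp h0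
    rw [← Int.toNat_of_nonneg hnn, hj]
  · rename_i hhead
    rw [PySem.Chars.find_eq_neg_one_iff]
    intro hinf
    have hin := (PySem.Chars.isIn_iff_infix ['>', c] _).mpr hinf
    obtain ⟨j, hpre⟩ := (PySem.Chars.exists_prefix_drop_iff_isIn ['>', c] _).mpr hin
    rw [prefix_two_iff] at hpre
    have h0 : (L ++ '>' :: R)[j]? = some '>' := by
      have := hpre.1; rwa [List.getElem?_drop, Nat.add_zero] at this
    have hj := (getElem?_gt L R hL hR _).mp h0
    have h1 : (L ++ '>' :: R)[j + 1]? = some c := by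
      have := hpre.2; rwa [List.getElem?_drop] at this
    rw [hj, List.getElem?_append_right (by omega)] at h1
    have : L.length + 1 - L.length = 1 := by omega
    rw [this] at h1
    simp only [List.getElem?_cons_succ] at h1
    exact hhead (by cases R with | nil => simp at h1 | cons r t => simpa using h1)

lemma isIn_cursor (L R : List Char) (c : Char) (hL : '>' ∉ L) (hR : '>' ∉ R) :
    PySem.Chars.isIn ['>', c] (L ++ '>' :: R) = decide (R.head? = some c) := by
  by_cases hh : R.head? = some c
  · simp only [hh, decide_true]
    rw [PySem.Chars.isIn_iff_infix, ← PySem.Chars.find_nonneg_iff, find_cursor L R c hL hR, if_pos hh]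
    exact Int.natCast_nonneg _
  · simp only [hh, decide_false]
    rw [PySem.Chars.isIn_eq_false_iff, ← PySem.Chars.find_eq_neg_one_iff, find_cursor L R c hL hR,
      if_neg hh]

lemma replaceOnce_cursor (L R : List Char) (c : Char) (new : List Char) (hL : '>' ∉ L)
    (hR : '>' ∉ R) (hhead : R.head? = some c) :
    replaceOnce (L ++ '>' :: R) ['>', c] new = L ++ new ++ R.tail := by
  unfold replaceOnce
  rw [find_cursor L R c hL hR, if_pos hhead, if_neg (by omega)]
  rw [Int.toNat_natCast, List.take_left, show (['>', c] : List Char).length = 2 from rfl,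
    List.drop_append, List.drop_eq_nil_of_le (by omega : L.length ≤ L.length + 2),
    show L.length + 2 - L.length = 2 by omega]
  simp only [List.nil_append, show (2:Nat) = 1 + 1 from rfl, List.drop_succ_cons, List.drop_one]

lemma gt_not_mem_trAll (u : List Char) : '>' ∉ trAll u := by
  intro h
  simp only [trAll, List.mem_flatMap] at h
  obtain ⟨a, _, hmem⟩ := h
  unfold trChar at hmem
  split_ifs at hmem <;> simp_all

lemma rule_step (L R : List Char) (c : Char) (pre new : List Char) (hnew : new = pre ++ ['>'])
    (hL : '>' ∉ L) (hR : '>' ∉ R) (hhead : R.head? = some c) :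
    replaceOnce (L ++ '>' :: R) ['>', c] new = (L ++ pre) ++ '>' :: R.tail := by
  rw [replaceOnce_cursor L R c _ hL hR hhead, hnew]
  cases R with
  | nil => simp at hhead
  | cons r t => simp [List.append_assoc]

lemma cond_step (L R : List Char) (c : Char) (pre new : List Char) (hnew : new = pre ++ ['>'])
    (hL : '>' ∉ L) (hR : '>' ∉ R) :
    (if PySem.Chars.isIn ['>', c] (L ++ '>' :: R) then
        replaceOnce (L ++ '>' :: R) ['>', c] new else (L ++ '>' :: R))
      = if R.head? = some c then (L ++ pre) ++ '>' :: R.tail else L ++ '>' :: R := by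
  rw [isIn_cursor L R c hL hR]
  by_cases hh : R.head? = some c
  · simp only [hh, decide_true, if_pos]
    exact rule_step L R c pre new hnew hL hR hh
  · simp [hh]

lemma not_gt_append (L p : List Char) (hL : '>' ∉ L) (hp : '>' ∉ p) : '>' ∉ L ++ p := by
  simp [List.mem_append, hL, hp]

lemma editorBody_cursor (L R : List Char) (hL : '>' ∉ L) (hR : '>' ∉ R)
    (hgood : ∀ a ∈ R, a = '0' ∨ a = '1' ∨ a = '2') :
    ∃ u v, R = u ++ v ∧ (R ≠ [] → u ≠ []) ∧
      editorBody (L ++ '>' :: R) = (L ++ trAll u) ++ '>' :: v := by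
  have hRt : '>' ∉ R.tail := fun h => hR (List.mem_of_mem_tail h)
  simp only [editorBody]
  rw [cond_step L R '1' ['2', '3'] ['2', '3', '>'] rfl hL hR]
  by_cases h1 : R.head? = some '1'
  · -- first replacement fires
    have hL1 : '>' ∉ L ++ ['2', '3'] := not_gt_append L _ hL (by decide)
    rw [if_pos h1, cond_step (L ++ ['2', '3']) R.tail '2' ['2'] ['2', '>'] rfl hL1 hRt]
    by_cases h2 : R.tail.head? = some '2'
    · have hRtt : '>' ∉ R.tail.tail := fun h => hRt (List.mem_of_mem_tail h)
      have hL2 : '>' ∉ (L ++ ['2', '3']) ++ ['2'] := not_gt_append _ _ hL1 (by decide)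
      rw [if_pos h2, cond_step ((L ++ ['2', '3']) ++ ['2']) R.tail.tail '0' ['3'] ['3', '>'] rfl hL2 hRtt]
      by_cases h3 : R.tail.tail.head? = some '0'
      · refine ⟨['1', '2', '0'], R.tail.tail.tail, ?_, fun _ => by simp, ?_⟩
        · cases R with
            | nil => simp at h1
            | cons a t =>
              simp at h1; subst h1
              cases t with
              | nil => simp at h2
              | cons b t2 =>
                simp at h2; subst h2
                cases t2 with
                | nil => simp at h3
                | cons d t3 => simp at h3; subst h3; simp
        · rw [if_pos h3]; simp [trAll, trChar, List.append_assoc]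
      · refine ⟨['1', '2'], R.tail.tail, ?_, fun _ => by simp, ?_⟩
        · cases R with
          | nil => simp at h1
          | cons a t =>
            simp at h1; subst h1
            cases t with
            | nil => simp at h2
            | cons b t2 => simp at h2; subst h2; simp
        · rw [if_neg h3]; simp [trAll, trChar, List.append_assoc]
    · rw [if_neg h2, cond_step (L ++ ['2', '3']) R.tail '0' ['3'] ['3', '>'] rfl hL1 hRt]
      by_cases h3 : R.tail.head? = some '0'
      · refine ⟨['1', '0'], R.tail.tail, ?_, fun _ => by simp, ?_⟩
        · cases R with
          | nil => simp at h1
          | cons a t =>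
            simp at h1; subst h1
            cases t with
            | nil => simp at h3
            | cons b t2 => simp at h3; subst h3; simp
        · rw [if_pos h3]; simp [trAll, trChar, List.append_assoc]
      · refine ⟨['1'], R.tail, ?_, fun _ => by simp, ?_⟩
        · cases R with
          | nil => simp at h1
          | cons a t => simp at h1; subst h1; simp
        · rw [if_neg h3]; simp [trAll, trChar, List.append_assoc]
  · -- first replacement does not fire
    rw [if_neg h1, cond_step L R '2' ['2'] ['2', '>'] rfl hL hR]
    by_cases h2 : R.head? = some '2'
    · have hL1 : '>' ∉ L ++ ['2'] := not_gt_append L _ hL (by decide)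
      rw [if_pos h2, cond_step (L ++ ['2']) R.tail '0' ['3'] ['3', '>'] rfl hL1 hRt]
      by_cases h3 : R.tail.head? = some '0'
      · refine ⟨['2', '0'], R.tail.tail, ?_, fun _ => by simp, ?_⟩
        · cases R with
          | nil => simp at h2
          | cons a t =>
            simp at h2; subst h2
            cases t with
            | nil => simp at h3
            | cons b t2 => simp at h3; subst h3; simp
        · rw [if_pos h3]; simp [trAll, trChar, List.append_assoc]
      · refine ⟨['2'], R.tail, ?_, fun _ => by simp, ?_⟩
        · cases R with
          | nil => simp at h2
          | cons a t => simp at h2; subst h2; simp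
        · rw [if_neg h3]; simp [trAll, trChar, List.append_assoc]
    · rw [if_neg h2, cond_step L R '0' ['3'] ['3', '>'] rfl hL hR]
      by_cases h3 : R.head? = some '0'
      · refine ⟨['0'], R.tail, ?_, fun _ => by simp, ?_⟩
        · cases R with
          | nil => simp at h3
          | cons a t => simp at h3; subst h3; simp
        · rw [if_pos h3]; simp [trAll, trChar, List.append_assoc]
      · -- R must be empty: its head is none of '0','1','2'
        have hRnil : R = [] := by
          cases R with
          | nil => rfl
          | cons a t =>
            rcases hgood a (by simp) with h | h | h <;> subst h <;> simp at h1 h2 h3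
        refine ⟨[], [], by simp [hRnil], fun h => absurd hRnil h, ?_⟩
        rw [if_neg h3]; simp [hRnil, trAll]

lemma editorLoop_cursor : ∀ (fuel : Nat) (L R : List Char), '>' ∉ L →
    (∀ a ∈ R, a = '0' ∨ a = '1' ∨ a = '2') → R.length < fuel →
    editorLoop fuel (L ++ '>' :: R) = (L ++ trAll R) ++ ['>'] := by
  intro fuel
  induction fuel with
  | zero => intro L R _ _ h; omega
  | succ f ih =>
    intro L R hL hgood hlen
    cases R with
    | nil =>
      simp [editorLoop, isIn_cursor L [] _ hL (by simp), trAll]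
    | cons c t =>
      have hRne : (c :: t : List Char) ≠ [] := by simp
      have hRgt : '>' ∉ (c :: t : List Char) := by
        intro h; rcases hgood _ h with h' | h' | h' <;> simp_all
      have hcond : (PySem.Chars.isIn ['>', '1'] (L ++ '>' :: c :: t) ||
          PySem.Chars.isIn ['>', '2'] (L ++ '>' :: c :: t) ||
          PySem.Chars.isIn ['>', '0'] (L ++ '>' :: c :: t)) = true := by
        rw [isIn_cursor L _ _ hL hRgt, isIn_cursor L _ _ hL hRgt, isIn_cursor L _ _ hL hRgt]
        rcases hgood c (by simp) with h | h | h <;> subst h <;> simp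
      rw [editorLoop, if_pos hcond]
      obtain ⟨u, v, hsplit, hne, hbody⟩ := editorBody_cursor L (c :: t) hL hRgt hgood
      rw [hbody]
      have hLu : '>' ∉ L ++ trAll u := by
        intro h; rcases List.mem_append.mp h with h | h
        · exact hL h
        · exact gt_not_mem_trAll u h
      have hgoodv : ∀ a ∈ v, a = '0' ∨ a = '1' ∨ a = '2' := by
        intro a ha; exact hgood a (by rw [hsplit]; exact List.mem_append.mpr (Or.inr ha))
      have hlenv : v.length < f := by
        have heq := congrArg List.length hsplit
        simp only [List.length_append, List.length_cons] at heq
        have hu : u ≠ [] := hne hRne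
        have hu1 : 1 ≤ u.length := List.length_pos_iff.mpr hu
        have hlen' : t.length + 1 < f + 1 := by simpa using hlen
        omega
      rw [ih (L ++ trAll u) v hLu hgoodv hlenv]
      simp [hsplit, trAll, List.append_assoc]

-- stripping the single trailing '>' : behaviour of PySem.Chars.replace.go on our final strings
lemma replace_go_strip (u : List Char) : ∀ (fuel : Nat) (acc : List Char), '>' ∉ u →
    u.length < fuel → PySem.Chars.replace.go ['>'] [] fuel (u ++ ['>']) acc = acc.reverse ++ u := by
  induction u with
  | nil =>
    intro fuel acc _ hf
    match fuel, hf with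
    | f + 1, _ =>
      simp only [List.nil_append, PySem.Chars.replace.go]
      rw [if_pos (by simp [List.isPrefixOf])]
      match f with
      | 0 => simp [PySem.Chars.replace.go]
      | g + 1 => simp [PySem.Chars.replace.go]
  | cons c u' ih =>
    intro fuel acc hmem hf
    match fuel, hf with
    | f + 1, hf' =>
      have hc : c ≠ '>' := by intro h; exact hmem (by simp [h])
      simp only [List.cons_append, PySem.Chars.replace.go]
      rw [if_neg (by simp [List.isPrefixOf, Ne.symm hc])]
      rw [ih f (c :: acc) (by intro h; exact hmem (by simp [h]))
        (by simp only [List.length_cons] at hf'; omega)]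
      simp

lemma foldl_digitVal (l : List Char) : ∀ (a : Int),
    l.foldl (fun acc c => acc + pyDigitVal c) a = a + (l.map pyDigitVal).sum := by
  induction l with
  | nil => intro a; simp
  | cons c t ih => intro a; simp [List.foldl_cons, ih, add_assoc]

lemma sum_trAll_replicate (c : Char) (k : Nat) :
    ((trAll (List.replicate k c)).map pyDigitVal).sum = (k : Int) * ((trChar c).map pyDigitVal).sum := by
  induction k with
  | zero => simp [trAll]
  | succ m ih =>
    rw [List.replicate_succ]
    simp only [trAll, List.flatMap_cons, List.map_append, List.sum_append]
    rw [show List.flatMap trChar (List.replicate m c) = trAll (List.replicate m c) from rfl, ih]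
    push_cast; ring

lemma trChar_sum_0 : ((trChar '0').map pyDigitVal).sum = 3 := by decide
lemma trChar_sum_1 : ((trChar '1').map pyDigitVal).sum = 5 := by decide
lemma trChar_sum_2 : ((trChar '2').map pyDigitVal).sum = 2 := by decide

lemma simulate_editor_closed (n : Int) : simulate_editor n = 87 + 5 * max n 0 := by
  simp only [simulate_editor]
  have hshape : (['>'] ++ List.replicate 15 '0' ++ List.replicate n.toNat '1' ++
      List.replicate 21 '2') = ([] : List Char) ++ '>' ::
      (List.replicate 15 '0' ++ List.replicate n.toNat '1' ++ List.replicate 21 '2') := by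
    simp
  rw [hshape]
  set R : List Char :=
    List.replicate 15 '0' ++ List.replicate n.toNat '1' ++ List.replicate 21 '2' with hRdef
  have hgood : ∀ a ∈ R, a = '0' ∨ a = '1' ∨ a = '2' := by
    intro a ha
    rw [hRdef] at ha
    simp only [List.mem_append, List.mem_replicate] at ha
    tauto
  have hlen : R.length < (([] : List Char) ++ '>' :: R).length := by simp
  rw [editorLoop_cursor _ [] R (by simp) hgood hlen]
  simp only [List.nil_append]
  have hrepl : PySem.Chars.replace (trAll R ++ ['>']) ['>'] [] = trAll R := by
    unfold PySem.Chars.replace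
    rw [if_neg (by simp), replace_go_strip (trAll R) _ [] (gt_not_mem_trAll R) (by simp)]
    simp
  rw [hrepl, foldl_digitVal]
  have hsum : ((trAll R).map pyDigitVal).sum = 45 + (n.toNat : Int) * 5 + 42 := by
    rw [hRdef]
    simp only [trAll, List.flatMap_append, List.map_append, List.sum_append]
    have e0 := sum_trAll_replicate '0' 15
    have e1 := sum_trAll_replicate '1' n.toNat
    have e2 := sum_trAll_replicate '2' 21
    simp only [trAll] at e0 e1 e2
    rw [e0, e1, e2, trChar_sum_0, trChar_sum_1, trChar_sum_2]
    push_cast; ring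
  rw [hsum]
  have hmax : ((n.toNat : Nat) : Int) = max n 0 := Int.ofNat_toNat n
  omega

-- ===== VERDICT (by name: the statement is the Claim_ definition above) =====
theorem simulate_editor_spec : Claim_equal_simulate_editor := by
  intro n _
  unfold Spec_simulate_editor simulate_editor_alt
  exact simulate_editor_closed n
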